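-- pv_equiv track=rewrite | github.com/DanRuta/xVA-Synth | python/xvapitch/text/text_preprocessing.py | split_pinyin
-- ===== SOURCE A (Python) =====
-- def split_pinyin (pinyin):
--     symbs_split = []
--
--     pinyin = pinyin.lower()
--
--     splitting_symbs = ["zh", "ch", "sh", "b", "p", "m", "f", "d", "t", "n", "l", "g", "k", "h", "z", "c", "s", "r", "j", "q", "x"]
--
--     for ss in splitting_symbs:
--         # if phon.startswith(ss) and not phon.endswith("i"):
--         if pinyin.startswith(ss):
--             symbs_split.append(ss.upper())
--             pinyin = pinyin[len(ss):]
--             break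
--     symbs_split.append(pinyin.upper())
--
--     return symbs_split
-- ===== SOURCE B (Python) =====
-- TWO = {"zh", "ch", "sh"}
-- ONE = set("bpmfdtnlgkhzcsrjqx")
--
-- def split_pinyin(pinyin):
--     pinyin = pinyin.lower()
--     if pinyin[:2] in TWO:
--         return [pinyin[:2].upper(), pinyin[2:].upper()]
--     if pinyin[:1] in ONE:
--         return [pinyin[:1].upper(), pinyin[1:].upper()]
--     return [pinyin.upper()]
-- ===== Notes on version B (the rewrite author's own statement) =====
-- stated objective: simpler
-- what changed: Replaces the 21-element scan-with-break by a direct decision on prefix length: check the two-char prefix against {zh,ch,sh}, then the one-char prefix against the 18 single initials, no loop at all.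
import Mathlib
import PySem

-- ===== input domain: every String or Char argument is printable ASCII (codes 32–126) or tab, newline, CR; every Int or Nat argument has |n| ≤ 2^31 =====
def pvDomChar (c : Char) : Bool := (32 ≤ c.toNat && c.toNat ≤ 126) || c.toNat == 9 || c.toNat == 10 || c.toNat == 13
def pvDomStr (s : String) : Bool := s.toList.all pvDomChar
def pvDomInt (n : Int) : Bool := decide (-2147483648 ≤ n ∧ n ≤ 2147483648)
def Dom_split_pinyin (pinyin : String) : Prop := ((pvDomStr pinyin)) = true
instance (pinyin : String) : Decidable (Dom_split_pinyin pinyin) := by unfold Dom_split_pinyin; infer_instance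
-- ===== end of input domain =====

-- B replaces A's 21-candidate scan-with-break by a direct prefix-length decision: two set-membership
-- tests (two-char prefix against {zh,ch,sh}, then one-char prefix against the 18 single initials).

-- ===== PORT A =====
-- A's candidate-initial list, in A's order.
def pvSplittingSymbs : List (List Char) :=
  [['z','h'], ['c','h'], ['s','h'], ['b'], ['p'], ['m'], ['f'], ['d'], ['t'], ['n'],
   ['l'], ['g'], ['k'], ['h'], ['z'], ['c'], ['s'], ['r'], ['j'], ['q'], ['x']]

-- A's for-loop with break: on the first matching prefix append its upper, strip it and stop;
-- afterwards (break taken or loop exhausted) append the remaining pinyin uppercased.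
def pvAScan : List (List Char) → List Char → List (List Char)
  | [], p => [PySem.Chars.upper p]
  | ss :: rest, p =>
      if PySem.Chars.startswith p ss then
        [PySem.Chars.upper ss, PySem.Chars.upper (PySem.List.slice p (some ((ss.length : Nat) : Int)) none)]
      else pvAScan rest p

def split_pinyin (pinyin : String) : List String :=
  (pvAScan pvSplittingSymbs (PySem.Chars.lower pinyin.toList)).map String.ofList

-- ===== PORT B =====
def pvTwo : PySem.Set (List Char) := PySem.Set.ofList [['z','h'], ['c','h'], ['s','h']]
def pvOne : PySem.Set (List Char) := PySem.Set.ofList [['b'],['p'],['m'],['f'],['d'],['t'],['n'],['l'],['g'],['k'],['h'],['z'],['c'],['s'],['r'],['j'],['q'],['x']]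

def split_pinyin_alt (pinyin : String) : List String :=
  let p := PySem.Chars.lower pinyin.toList
  if PySem.List.slice p none (some 2) ∈ pvTwo then
    [String.ofList (PySem.Chars.upper (PySem.List.slice p none (some 2))),
     String.ofList (PySem.Chars.upper (PySem.List.slice p (some 2) none))]
  else if PySem.List.slice p none (some 1) ∈ pvOne then
    [String.ofList (PySem.Chars.upper (PySem.List.slice p none (some 1))),
     String.ofList (PySem.Chars.upper (PySem.List.slice p (some 1) none))]
  else
    [String.ofList (PySem.Chars.upper p)]

-- ===== PRECONDITION & SPEC =====
def Spec_split_pinyin (pinyin : String) (out : List String) : Prop := out = split_pinyin_alt pinyin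
instance (pinyin : String) (out : List String) : Decidable (Spec_split_pinyin pinyin out) := by unfold Spec_split_pinyin; infer_instance

-- ===== CLAIM (what is proved, stated in full; the proofs are below) =====
def Claim_equal_split_pinyin : Prop := ∀ (pinyin : String), Dom_split_pinyin pinyin → Spec_split_pinyin pinyin (split_pinyin pinyin)

-- ===== LEMMAS AND PROOFS =====

theorem pvTwoEq : pvTwo = [['z','h'], ['c','h'], ['s','h']] := by decide
theorem pvOneEq : pvOne = [['b'],['p'],['m'],['f'],['d'],['t'],['n'],['l'],['g'],['k'],['h'],['z'],['c'],['s'],['r'],['j'],['q'],['x']] := by decide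

set_option maxHeartbeats 1000000 in
theorem pvKeySingle (c : Char) :
    pvAScan pvSplittingSymbs [c] =
      (if [c] ∈ ([['z','h'], ['c','h'], ['s','h']] : List (List Char)) then
        [PySem.Chars.upper [c], PySem.Chars.upper ([] : List Char)]
      else if [c] ∈ ([['b'],['p'],['m'],['f'],['d'],['t'],['n'],['l'],['g'],['k'],['h'],['z'],['c'],['s'],['r'],['j'],['q'],['x']] : List (List Char)) then
        [PySem.Chars.upper [c], PySem.Chars.upper ([] : List Char)]
      else [PySem.Chars.upper [c]]) := by
  rw [if_neg (by simp)]
  simp only [pvAScan, pvSplittingSymbs, PySem.Chars.startswith, List.isPrefixOf,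
    Bool.and_true, Bool.and_false, beq_iff_eq, List.length_cons,
    List.length_nil, if_false, Bool.false_eq_true]
  by_cases h0 : c = 'b'
  · subst h0; simp [PySem.List.slice]
  rw [if_neg (fun hx => h0 hx.symm)]
  by_cases h1 : c = 'p'
  · subst h1; simp [PySem.List.slice]
  rw [if_neg (fun hx => h1 hx.symm)]
  by_cases h2 : c = 'm'
  · subst h2; simp [PySem.List.slice]
  rw [if_neg (fun hx => h2 hx.symm)]
  by_cases h3 : c = 'f'
  · subst h3; simp [PySem.List.slice]
  rw [if_neg (fun hx => h3 hx.symm)]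
  by_cases h4 : c = 'd'
  · subst h4; simp [PySem.List.slice]
  rw [if_neg (fun hx => h4 hx.symm)]
  by_cases h5 : c = 't'
  · subst h5; simp [PySem.List.slice]
  rw [if_neg (fun hx => h5 hx.symm)]
  by_cases h6 : c = 'n'
  · subst h6; simp [PySem.List.slice]
  rw [if_neg (fun hx => h6 hx.symm)]
  by_cases h7 : c = 'l'
  · subst h7; simp [PySem.List.slice]
  rw [if_neg (fun hx => h7 hx.symm)]
  by_cases h8 : c = 'g'
  · subst h8; simp [PySem.List.slice]
  rw [if_neg (fun hx => h8 hx.symm)]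
  by_cases h9 : c = 'k'
  · subst h9; simp [PySem.List.slice]
  rw [if_neg (fun hx => h9 hx.symm)]
  by_cases h10 : c = 'h'
  · subst h10; simp [PySem.List.slice]
  rw [if_neg (fun hx => h10 hx.symm)]
  by_cases h11 : c = 'z'
  · subst h11; simp [PySem.List.slice]
  rw [if_neg (fun hx => h11 hx.symm)]
  by_cases h12 : c = 'c'
  · subst h12; simp [PySem.List.slice]
  rw [if_neg (fun hx => h12 hx.symm)]
  by_cases h13 : c = 's'
  · subst h13; simp [PySem.List.slice]
  rw [if_neg (fun hx => h13 hx.symm)]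
  by_cases h14 : c = 'r'
  · subst h14; simp [PySem.List.slice]
  rw [if_neg (fun hx => h14 hx.symm)]
  by_cases h15 : c = 'j'
  · subst h15; simp [PySem.List.slice]
  rw [if_neg (fun hx => h15 hx.symm)]
  by_cases h16 : c = 'q'
  · subst h16; simp [PySem.List.slice]
  rw [if_neg (fun hx => h16 hx.symm)]
  by_cases h17 : c = 'x'
  · subst h17; simp [PySem.List.slice]
  rw [if_neg (fun hx => h17 hx.symm)]
  rw [if_neg (by simp only [List.mem_cons, List.not_mem_nil, List.cons.injEq, or_false, and_true, not_or]; exact ⟨h0, h1, h2, h3, h4, h5, h6, h7, h8, h9, h10, h11, h12, h13, h14, h15, h16, h17⟩)]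

set_option maxHeartbeats 2000000 in
theorem pvKeyCons (c1 c2 : Char) (rest : List Char) :
    pvAScan pvSplittingSymbs (c1::c2::rest) =
      (if [c1,c2] ∈ ([['z','h'], ['c','h'], ['s','h']] : List (List Char)) then
        [PySem.Chars.upper [c1,c2], PySem.Chars.upper rest]
      else if [c1] ∈ ([['b'],['p'],['m'],['f'],['d'],['t'],['n'],['l'],['g'],['k'],['h'],['z'],['c'],['s'],['r'],['j'],['q'],['x']] : List (List Char)) then
        [PySem.Chars.upper [c1], PySem.Chars.upper (c2::rest)]
      else [PySem.Chars.upper (c1::c2::rest)]) := by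
  have g1 : PySem.List.slice (c1::c2::rest) (some ((1:Nat):Int)) none = c2::rest := by
    rw [PySem.List.slice_from _ (by omega)]; rfl
  have g2 : PySem.List.slice (c1::c2::rest) (some ((2:Nat):Int)) none = rest := by
    rw [PySem.List.slice_from _ (by omega)]; rfl
  simp only [pvAScan, pvSplittingSymbs, PySem.Chars.startswith, List.isPrefixOf,
    Bool.and_true, Bool.and_eq_true, beq_iff_eq, List.length_cons, List.length_nil]
  simp only [g1, g2]
  by_cases h0 : c1 = 'z' ∧ c2 = 'h'
  · obtain ⟨e1, e2⟩ := h0; subst e1; subst e2; simp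
  rw [if_neg (fun hx => h0 ⟨hx.1.symm, hx.2.symm⟩)]
  by_cases h1 : c1 = 'c' ∧ c2 = 'h'
  · obtain ⟨e1, e2⟩ := h1; subst e1; subst e2; simp
  rw [if_neg (fun hx => h1 ⟨hx.1.symm, hx.2.symm⟩)]
  by_cases h2 : c1 = 's' ∧ c2 = 'h'
  · obtain ⟨e1, e2⟩ := h2; subst e1; subst e2; simp
  rw [if_neg (fun hx => h2 ⟨hx.1.symm, hx.2.symm⟩)]
  by_cases h3 : c1 = 'b'
  · subst h3; simp
  rw [if_neg (fun hx => h3 hx.symm)]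
  by_cases h4 : c1 = 'p'
  · subst h4; simp
  rw [if_neg (fun hx => h4 hx.symm)]
  by_cases h5 : c1 = 'm'
  · subst h5; simp
  rw [if_neg (fun hx => h5 hx.symm)]
  by_cases h6 : c1 = 'f'
  · subst h6; simp
  rw [if_neg (fun hx => h6 hx.symm)]
  by_cases h7 : c1 = 'd'
  · subst h7; simp
  rw [if_neg (fun hx => h7 hx.symm)]
  by_cases h8 : c1 = 't'
  · subst h8; simp
  rw [if_neg (fun hx => h8 hx.symm)]
  by_cases h9 : c1 = 'n'
  · subst h9; simp
  rw [if_neg (fun hx => h9 hx.symm)]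
  by_cases h10 : c1 = 'l'
  · subst h10; simp
  rw [if_neg (fun hx => h10 hx.symm)]
  by_cases h11 : c1 = 'g'
  · subst h11; simp
  rw [if_neg (fun hx => h11 hx.symm)]
  by_cases h12 : c1 = 'k'
  · subst h12; simp
  rw [if_neg (fun hx => h12 hx.symm)]
  by_cases h13 : c1 = 'h'
  · subst h13; simp
  rw [if_neg (fun hx => h13 hx.symm)]
  by_cases h14 : c1 = 'z'
  · subst h14; have hne : c2 ≠ 'h' := fun e => h0 ⟨rfl, e⟩; simp [hne]
  rw [if_neg (fun hx => h14 hx.symm)]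
  by_cases h15 : c1 = 'c'
  · subst h15; have hne : c2 ≠ 'h' := fun e => h1 ⟨rfl, e⟩; simp [hne]
  rw [if_neg (fun hx => h15 hx.symm)]
  by_cases h16 : c1 = 's'
  · subst h16; have hne : c2 ≠ 'h' := fun e => h2 ⟨rfl, e⟩; simp [hne]
  rw [if_neg (fun hx => h16 hx.symm)]
  by_cases h17 : c1 = 'r'
  · subst h17; simp
  rw [if_neg (fun hx => h17 hx.symm)]
  by_cases h18 : c1 = 'j'
  · subst h18; simp
  rw [if_neg (fun hx => h18 hx.symm)]
  by_cases h19 : c1 = 'q'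
  · subst h19; simp
  rw [if_neg (fun hx => h19 hx.symm)]
  by_cases h20 : c1 = 'x'
  · subst h20; simp
  rw [if_neg (fun hx => h20 hx.symm)]
  rw [if_neg (by simp only [List.mem_cons, List.not_mem_nil, List.cons.injEq, or_false, and_true, not_or]; exact ⟨h0, h1, h2⟩)]
  rw [if_neg (by simp only [List.mem_cons, List.not_mem_nil, List.cons.injEq, or_false, and_true, not_or]; exact ⟨h3, h4, h5, h6, h7, h8, h9, h10, h11, h12, h13, h14, h15, h16, h17, h18, h19, h20⟩)]

-- A's scan equals B's prefix-length decision on any character list.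
theorem pvKey (q : List Char) :
    pvAScan pvSplittingSymbs q =
      (if PySem.List.slice q none (some 2) ∈ pvTwo then
        [PySem.Chars.upper (PySem.List.slice q none (some 2)),
         PySem.Chars.upper (PySem.List.slice q (some 2) none)]
      else if PySem.List.slice q none (some 1) ∈ pvOne then
        [PySem.Chars.upper (PySem.List.slice q none (some 1)),
         PySem.Chars.upper (PySem.List.slice q (some 1) none)]
      else [PySem.Chars.upper q]) := by
  have h1 : PySem.List.slice q none (some 1) = q.take 1 := by
    rw [PySem.List.slice_to _ (by omega)]; rfl
  have h2 : PySem.List.slice q none (some 2) = q.take 2 := by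
    rw [PySem.List.slice_to _ (by omega)]; rfl
  have g1 : PySem.List.slice q (some 1) none = q.drop 1 := by
    rw [PySem.List.slice_from _ (by omega)]; rfl
  have g2 : PySem.List.slice q (some 2) none = q.drop 2 := by
    rw [PySem.List.slice_from _ (by omega)]; rfl
  rw [h1, h2, g1, g2, pvTwoEq, pvOneEq]
  match q with
  | [] => decide
  | [c] => simpa using pvKeySingle c
  | c1 :: c2 :: rest => simpa using pvKeyCons c1 c2 rest

-- ===== VERDICT (by name: the statement is the Claim_ definition above) =====
theorem split_pinyin_spec : Claim_equal_split_pinyin := by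
  intro pinyin _
  unfold Spec_split_pinyin split_pinyin split_pinyin_alt
  rw [pvKey]
  by_cases t2 : PySem.List.slice (PySem.Chars.lower pinyin.toList) none (some 2) ∈ pvTwo <;>
    by_cases t1 : PySem.List.slice (PySem.Chars.lower pinyin.toList) none (some 1) ∈ pvOne <;>
    simp [t1, t2]
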